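-- pv_equiv track=rewrite | github.com/bitbot-irc/bitbot | modules/message_filter.py | _split
-- ===== SOURCE A (Python) =====
-- def _split(s):
--     backslash = False
--     forward_slash = []
--     for i, c in enumerate(s):
--         if not backslash:
--             if c == "/":
--                 forward_slash.append(i)
--             if c == "\\":
--                 backslash = True
--         else:
--             backslash = False
--     if forward_slash and (not forward_slash[-1] == (len(s)-1)):
--         forward_slash.append(len(s))
--
--     last = 0
--     out = []
--     for i in forward_slash:
--         out.append(s[last:i])
--         last = i+1
--     return out
-- ===== SOURCE B (Python) =====
-- def _split(s):
--     out = []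
--     last = 0
--     escaped = False
--     saw_slash = False
--     for i, c in enumerate(s):
--         if escaped:
--             escaped = False
--         elif c == "/":
--             out.append(s[last:i])
--             last = i + 1
--             saw_slash = True
--         elif c == "\\":
--             escaped = True
--     if saw_slash and last != len(s):
--         out.append(s[last:])
--     return out
-- ===== Notes on version B (the rewrite author's own statement) =====
-- stated objective: alternative
-- what changed: B splits in a single pass that emits each segment as soon as its closing unescaped slash is seen (state: segment start, escape flag, saw-slash flag), instead of A's two-phase scheme that first builds a list of slash indices and then slices in a second loop.
import Mathlib
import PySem

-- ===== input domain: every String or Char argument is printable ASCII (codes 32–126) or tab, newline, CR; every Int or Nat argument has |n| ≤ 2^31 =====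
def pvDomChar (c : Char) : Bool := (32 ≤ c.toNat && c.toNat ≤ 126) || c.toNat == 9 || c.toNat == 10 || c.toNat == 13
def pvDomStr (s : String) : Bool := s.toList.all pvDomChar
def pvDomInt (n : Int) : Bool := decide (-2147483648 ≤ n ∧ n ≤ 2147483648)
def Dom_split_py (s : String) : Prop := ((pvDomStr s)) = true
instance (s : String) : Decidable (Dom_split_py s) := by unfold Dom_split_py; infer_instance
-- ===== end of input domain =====

-- B is a single-pass re-decomposition of A (emit each segment at its closing slash) with the same return value; neither mutates anything.

-- ===== PORT A =====
-- first loop of A: collect indices of unescaped '/'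
def pvStepA (st : Bool × List Int) (p : Int × Char) : Bool × List Int :=
  if !st.1 then (p.2 == '\\', if p.2 == '/' then st.2 ++ [p.1] else st.2)
  else (false, st.2)

-- second loop of A: slice between collected indices, threading `last`
def pvEmitStep (cs : List Char) (st : Int × List String) (i : Int) : Int × List String :=
  (i + 1, st.2 ++ [String.ofList (PySem.List.slice cs (some st.1) (some i))])

def split_py (s : String) : List String :=
  let cs := s.toList
  let r := (PySem.List.enumerate cs 0).foldl pvStepA (false, ([] : List Int))
  let fs := r.2
  let fs := if fs ≠ [] ∧ fs.getLast? ≠ some ((cs.length : Int) - 1) then fs ++ [(cs.length : Int)] else fs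
  (fs.foldl (pvEmitStep cs) (0, [])).2

-- ===== PORT B =====
-- single pass: state (out, last, escaped, saw_slash)
def pvStepB (cs : List Char) (st : List String × Int × Bool × Bool) (p : Int × Char) :
    List String × Int × Bool × Bool :=
  if st.2.2.1 then (st.1, st.2.1, false, st.2.2.2)
  else if p.2 == '/' then
    (st.1 ++ [String.ofList (PySem.List.slice cs (some st.2.1) (some p.1))], p.1 + 1, false, true)
  else if p.2 == '\\' then (st.1, st.2.1, true, st.2.2.2)
  else st

def split_py_alt (s : String) : List String :=
  let cs := s.toList
  let st := (PySem.List.enumerate cs 0).foldl (pvStepB cs) ([], 0, false, false)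
  if st.2.2.2 = true ∧ st.2.1 ≠ (cs.length : Int) then
    st.1 ++ [String.ofList (PySem.List.slice cs (some st.2.1) none)]
  else st.1

-- ===== PRECONDITION & SPEC =====
def Spec_split_py (s : String) (out : List String) : Prop := out = split_py_alt s
instance (s : String) (out : List String) : Decidable (Spec_split_py s out) := by unfold Spec_split_py; infer_instance

-- ===== CLAIM (what is proved, stated in full; the proofs are below) =====
def Claim_equal_split_py : Prop := ∀ (s : String), Dom_split_py s → Spec_split_py s (split_py s)

-- ===== LEMMAS AND PROOFS =====

-- A's second loop, as a function of the index list
def pvEmit (cs : List Char) (fs : List Int) : Int × List String :=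
  fs.foldl (pvEmitStep cs) (0, [])

theorem pvEmit_concat (cs : List Char) (fs : List Int) (i : Int) :
    pvEmit cs (fs ++ [i]) =
      (i + 1, (pvEmit cs fs).2 ++ [String.ofList (PySem.List.slice cs (some (pvEmit cs fs).1) (some i))]) := by
  simp [pvEmit, List.foldl_append, pvEmitStep]

-- the `last` threaded by A's second loop stays nonnegative when all appended indices are ≥ -1
theorem pvEmit_fst_nonneg (cs : List Char) (e : List (Int × Char)) (b : Bool) (fs : List Int)
    (he : ∀ p ∈ e, 0 ≤ p.1) (hfs : 0 ≤ (pvEmit cs fs).1) :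
    0 ≤ (pvEmit cs (e.foldl pvStepA (b, fs)).2).1 := by
  induction e generalizing b fs with
  | nil => simpa using hfs
  | cons p e ih =>
    have hp : 0 ≤ p.1 := he p (by simp)
    have he' : ∀ q ∈ e, 0 ≤ q.1 := fun q hq => he q (by simp [hq])
    by_cases hb : b
    · simpa [List.foldl_cons, pvStepA, hb] using ih false fs he' hfs
    · by_cases hs : p.2 = '/'
      · have : 0 ≤ (pvEmit cs (fs ++ [p.1])).1 := by
          rw [pvEmit_concat]; omega
        simpa [List.foldl_cons, pvStepA, hb, hs] using ih _ (fs ++ [p.1]) he' this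
      · simpa [List.foldl_cons, pvStepA, hb, hs] using ih _ fs he' hfs

-- main invariant: B's running state is determined by A's running state
theorem pvInv (cs : List Char) (e : List (Int × Char)) (b : Bool) (fs : List Int) :
    e.foldl (pvStepB cs) ((pvEmit cs fs).2, (pvEmit cs fs).1, b, !fs.isEmpty) =
      ((pvEmit cs (e.foldl pvStepA (b, fs)).2).2,
       (pvEmit cs (e.foldl pvStepA (b, fs)).2).1,
       (e.foldl pvStepA (b, fs)).1,
       !(e.foldl pvStepA (b, fs)).2.isEmpty) := by
  induction e generalizing b fs with
  | nil => simp
  | cons p e ih =>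
    by_cases hb : b
    · simpa [List.foldl_cons, pvStepB, pvStepA, hb] using ih false fs
    · by_cases hs : p.2 = '/'
      · have h := ih false (fs ++ [p.1])
        rw [pvEmit_concat] at h
        rw [show (!(fs ++ [p.1]).isEmpty) = true by simp] at h
        simpa [List.foldl_cons, pvStepB, pvStepA, hb, hs] using h
      · by_cases hbs : p.2 = '\\'
        · simpa [List.foldl_cons, pvStepB, pvStepA, hb, hs, hbs] using ih true fs
        · have hb2 : (p.2 == '\\') = false := by simp [hbs]
          simpa [List.foldl_cons, pvStepB, pvStepA, hb, hs, hbs, hb2] using ih false fs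

-- a slice from a nonnegative index to the end-of-list index is the open-ended slice
theorem pvSlice_to_len (cs : List Char) (a : Int) (ha : 0 ≤ a) :
    PySem.List.slice cs (some a) (some (cs.length : Int)) = PySem.List.slice cs (some a) none := by
  rw [PySem.List.slice_toNat cs ha (Int.natCast_nonneg _), PySem.List.slice_from cs ha]
  have : ((cs.length : Int)).toNat = cs.length := by omega
  rw [this]
  exact List.take_of_length_le (by simp)

theorem split_py_eq_alt (s : String) : split_py s = split_py_alt s := by
  simp only [split_py, split_py_alt]
  set cs := s.toList with hcs
  have he : ∀ p ∈ PySem.List.enumerate cs 0, 0 ≤ p.1 := by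
    intro p hp
    rcases (PySem.List.mem_enumerate_iff _ _ _).1 hp with ⟨k, hk, rfl⟩
    simp
  have hinv := pvInv cs (PySem.List.enumerate cs 0) false []
  have hnn := pvEmit_fst_nonneg cs (PySem.List.enumerate cs 0) false [] he (by simp [pvEmit])
  have h0 : pvEmit cs ([] : List Int) = (0, []) := rfl
  simp only [h0, List.isEmpty_nil, Bool.not_true] at hinv
  set r := (PySem.List.enumerate cs 0).foldl pvStepA (false, ([] : List Int)) with hr
  rw [hinv]
  dsimp only
  simp only [show ∀ fs : List Int,
    List.foldl (pvEmitStep cs) (0, ([] : List String)) fs = pvEmit cs fs from fun _ => rfl]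
  rcases List.eq_nil_or_concat r.2 with h2 | ⟨fs₀, L, h2⟩
  · simp [h2, pvEmit]
  · rw [List.concat_eq_append] at h2
    have hlast : (pvEmit cs r.2).1 = L + 1 := by rw [h2, pvEmit_concat]
    have hgl : r.2.getLast? = some L := by rw [h2]; exact List.getLast?_concat
    have hne : r.2 ≠ [] := by simp [h2]
    have hie : (!r.2.isEmpty) = true := by simp [h2]
    rw [hlast] at hnn
    by_cases hL : L = (cs.length : Int) - 1
    · rw [if_neg, if_neg]
      · intro h
        exact h.2 (by rw [hlast, hL]; omega)
      · intro h
        exact h.2 (by rw [hgl, hL])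
    · rw [if_pos ⟨hne, by simp [hgl, hL]⟩, if_pos ⟨hie, by rw [hlast]; omega⟩,
          pvEmit_concat]
      dsimp only
      rw [hlast, pvSlice_to_len cs (L + 1) (by omega)]

-- ===== VERDICT (by name: the statement is the Claim_ definition above) =====
theorem split_py_spec : Claim_equal_split_py := by
  intro s _
  exact split_py_eq_alt s
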